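-- pv_equiv track=rewrite | github.com/nin9/CTCI-6th | Chapter10/5-sparseSearch.py | search
-- ===== SOURCE A (Python) =====
-- from typing import List
--
-- def search(arr: List[int], word: str) -> int:
--   l, r = 0, len(arr) - 1
--
--   while l <= r:
--     m = l + (r-l)//2
--
--     if arr[m] == '':
--       ml = m - 1
--       mr = m + 1
--       while True:
--         if ml < l and mr > r:
--           return -1
--         if ml >= l and arr[ml] != '':
--           m = ml
--           break
--         elif mr <= r and arr[mr] != '':
--           m = mr
--           break
--         ml -= 1
--         mr += 1
--
--     if arr[m] == word:
--       return m
--     elif word < arr[m]: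
--       r = m - 1
--     else:
--       l = m + 1
--   return -1
-- ===== SOURCE B (Python) =====
-- from typing import List
--
--
-- def _prev_nonempty(arr, l, i):
--     # nearest non-empty slot at index <= i, not below l (None if that range is all '')
--     while i >= l:
--         if arr[i] != '':
--             return i
--         i -= 1
--     return None
--
--
-- def _next_nonempty(arr, r, j):
--     # nearest non-empty slot at index >= j, not above r (None if that range is all '')
--     while j <= r:
--         if arr[j] != '':
--             return j
--         j += 1
--     return None
--
--
-- def search(arr: List[str], word: str) -> int:
--     def rec(l, r):
--         if l > r:
--             return -1
--         m = l + (r - l) // 2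
--         if arr[m] == '':
--             left = _prev_nonempty(arr, l, m - 1)
--             right = _next_nonempty(arr, r, m + 1)
--             if left is None and right is None:
--                 return -1
--             # ties (equal distance) prefer the lower index
--             if right is None or (left is not None and m - left <= right - m):
--                 m = left
--             else:
--                 m = right
--         if arr[m] == word:
--             return m
--         if word < arr[m]:
--             return rec(l, m - 1)
--         return rec(m + 1, r)
--     return rec(0, len(arr) - 1)
-- ===== Notes on version B (the rewrite author's own statement) =====
-- stated objective: alternative
-- what changed: The outer while-loop becomes a divide-and-conquer recursion rec(l,r), and A's lockstep two-pointer expand loop is replaced by two independent directional scans for the nearest non-empty slot plus an arithmetic distance comparison (ties prefer the lower index).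
import Mathlib
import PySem

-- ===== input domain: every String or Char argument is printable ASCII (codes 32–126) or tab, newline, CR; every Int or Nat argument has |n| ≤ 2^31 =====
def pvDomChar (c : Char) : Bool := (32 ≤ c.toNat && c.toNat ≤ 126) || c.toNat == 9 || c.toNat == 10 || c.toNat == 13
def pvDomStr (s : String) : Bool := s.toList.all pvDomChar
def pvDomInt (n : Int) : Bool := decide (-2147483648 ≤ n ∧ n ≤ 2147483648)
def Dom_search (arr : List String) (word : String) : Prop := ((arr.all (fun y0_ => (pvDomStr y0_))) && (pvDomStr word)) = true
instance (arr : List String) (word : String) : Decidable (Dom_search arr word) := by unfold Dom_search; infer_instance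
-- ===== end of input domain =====

-- B re-implements the sparse search with a recursive divide-and-conquer and two independent
-- directional scans for the nearest non-empty slot (alternative decomposition; same results).


-- ===== PORT A =====
-- A's inner `while True` expand loop: steps ml down and mr up in lockstep, checking the
-- left side first; `none` = the Python `return -1`. The Nat argument is fuel that only
-- makes the recursion structural; `expandA` below supplies enough for every input.
def expandGo (arr : List String) (l r : Int) : Nat → Int → Int → Option Int
  | 0, _, _ => none
  | n + 1, ml, mr =>
    if ml < l ∧ mr > r then none
    else if l ≤ ml ∧ (PySem.List.pyGetD arr ml "") ≠ "" then some ml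
    else if mr ≤ r ∧ (PySem.List.pyGetD arr mr "") ≠ "" then some mr
    else expandGo arr l r n (ml - 1) (mr + 1)

def expandA (arr : List String) (l r ml mr : Int) : Option Int :=
  expandGo arr l r ((ml - l + 1).toNat + (r - mr + 1).toNat + 1) ml mr

-- A's outer `while l <= r` loop; same fuel discipline (fuel 0 never reached from `search`).
def searchLoopA (arr : List String) (word : String) : Nat → Int → Int → Int
  | 0, _, _ => -1
  | fuel + 1, l, r =>
    if l ≤ r then
      let m := l + PySem.Int.floordiv (r - l) 2
      let m? : Option Int :=
        if PySem.List.pyGetD arr m "" = "" then expandA arr l r (m - 1) (m + 1) else some m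
      match m? with
      | none => -1
      | some m =>
        if PySem.List.pyGetD arr m "" = word then m
        else if word < PySem.List.pyGetD arr m "" then searchLoopA arr word fuel l (m - 1)
        else searchLoopA arr word fuel (m + 1) r
    else -1

def search (arr : List String) (word : String) : Int :=
  searchLoopA arr word (arr.length + 1) 0 ((arr.length : Int) - 1)

-- ===== PORT B =====
-- B's helper _prev_nonempty: nearest non-empty index ≤ i, not below l
-- (the fuel counts the remaining iterations of the `while i >= l` loop).
def prevGo (arr : List String) : Nat → Int → Option Int
  | 0, _ => none
  | n + 1, i => if (PySem.List.pyGetD arr i "") ≠ "" then some i else prevGo arr n (i - 1)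

def prevNonempty (arr : List String) (l i : Int) : Option Int :=
  prevGo arr (i - l + 1).toNat i

-- B's helper _next_nonempty: nearest non-empty index ≥ j, not above r.
def nextGo (arr : List String) : Nat → Int → Option Int
  | 0, _ => none
  | n + 1, j => if (PySem.List.pyGetD arr j "") ≠ "" then some j else nextGo arr n (j + 1)

def nextNonempty (arr : List String) (r j : Int) : Option Int :=
  nextGo arr (r - j + 1).toNat j

-- B's recursive rec(l, r); same fuel discipline as A's port.
def searchRecB (arr : List String) (word : String) : Nat → Int → Int → Int
  | 0, _, _ => -1
  | fuel + 1, l, r =>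
    if l > r then -1
    else
      let m := l + PySem.Int.floordiv (r - l) 2
      let m? : Option Int :=
        if PySem.List.pyGetD arr m "" = "" then
          match prevNonempty arr l (m - 1), nextNonempty arr r (m + 1) with
          | none, none => none
          | some a, none => some a
          | none, some b => some b
          | some a, some b => if m - a ≤ b - m then some a else some b
        else some m
      match m? with
      | none => -1
      | some m =>
        if PySem.List.pyGetD arr m "" = word then m
        else if word < PySem.List.pyGetD arr m "" then searchRecB arr word fuel l (m - 1)
        else searchRecB arr word fuel (m + 1) r

def search_alt (arr : List String) (word : String) : Int :=
  searchRecB arr word (arr.length + 1) 0 ((arr.length : Int) - 1)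

-- ===== PRECONDITION & SPEC =====
def Spec_search (arr : List String) (word : String) (out : Int) : Prop := out = search_alt arr word
instance (arr : List String) (word : String) (out : Int) : Decidable (Spec_search arr word out) := by unfold Spec_search; infer_instance

-- ===== CLAIM (what is proved, stated in full; the proofs are below) =====
def Claim_equal_search : Prop := ∀ (arr : List String) (word : String), Dom_search arr word → Spec_search arr word (search arr word)

-- ===== LEMMAS AND PROOFS =====

-- The choice B makes out of the two scans, as a function of the scan starting points.
def chooseLR (ml mr : Int) : Option Int → Option Int → Option Int
  | none, none => none
  | some a, none => some a
  | none, some b => some b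
  | some a, some b => if ml - a ≤ b - mr then some a else some b

-- The scans unfold one Python loop iteration at a time.
theorem prevNonempty_step (arr : List String) (l i : Int) :
    prevNonempty arr l i =
      if l ≤ i then
        (if (PySem.List.pyGetD arr i "") ≠ "" then some i else prevNonempty arr l (i - 1))
      else none := by
  unfold prevNonempty
  by_cases h : l ≤ i
  · rw [if_pos h, show (i - l + 1).toNat = (i - 1 - l + 1).toNat + 1 by omega]
    rfl
  · rw [if_neg h, show (i - l + 1).toNat = 0 by omega]
    rfl

theorem nextNonempty_step (arr : List String) (r j : Int) :
    nextNonempty arr r j =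
      if j ≤ r then
        (if (PySem.List.pyGetD arr j "") ≠ "" then some j else nextNonempty arr r (j + 1))
      else none := by
  unfold nextNonempty
  by_cases h : j ≤ r
  · rw [if_pos h, show (r - j + 1).toNat = (r - (j + 1) + 1).toNat + 1 by omega]
    rfl
  · rw [if_neg h, show (r - j + 1).toNat = 0 by omega]
    rfl

theorem prevGo_bounds (arr : List String) :
    ∀ (n : Nat) (i a : Int), prevGo arr n i = some a → i - n < a ∧ a ≤ i := by
  intro n
  induction n with
  | zero => intro i a ha; simp [prevGo] at ha
  | succ k ih =>
    intro i a ha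
    rw [prevGo] at ha
    by_cases hc : (PySem.List.pyGetD arr i "") ≠ ""
    · rw [if_pos hc] at ha; simp at ha; omega
    · rw [if_neg hc] at ha; have := ih (i - 1) a ha; omega

theorem nextGo_bounds (arr : List String) :
    ∀ (n : Nat) (j b : Int), nextGo arr n j = some b → j ≤ b ∧ b < j + n := by
  intro n
  induction n with
  | zero => intro j b hb; simp [nextGo] at hb
  | succ k ih =>
    intro j b hb
    rw [nextGo] at hb
    by_cases hc : (PySem.List.pyGetD arr j "") ≠ ""
    · rw [if_pos hc] at hb; simp at hb; omega
    · rw [if_neg hc] at hb; have := ih (j + 1) b hb; omega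

theorem prevNonempty_bounds (arr : List String) (l i : Int) :
    ∀ a, prevNonempty arr l i = some a → l ≤ a ∧ a ≤ i := by
  intro a ha
  unfold prevNonempty at ha
  have := prevGo_bounds arr ((i - l + 1).toNat) i a ha
  by_cases h : l ≤ i
  · omega
  · rw [show (i - l + 1).toNat = 0 by omega] at ha; simp [prevGo] at ha

theorem nextNonempty_bounds (arr : List String) (r j : Int) :
    ∀ b, nextNonempty arr r j = some b → j ≤ b ∧ b ≤ r := by
  intro b hb
  unfold nextNonempty at hb
  have := nextGo_bounds arr ((r - j + 1).toNat) j b hb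
  by_cases h : j ≤ r
  · omega
  · rw [show (r - j + 1).toNat = 0 by omega] at hb; simp [nextGo] at hb

-- A's lockstep expand loop (with sufficient fuel) equals B's two independent scans
-- + distance comparison.
theorem expandGo_eq_choose (arr : List String) (l r : Int) :
    ∀ (n : Nat) (ml mr : Int), (ml - l + 1).toNat + (r - mr + 1).toNat < n →
      expandGo arr l r n ml mr =
        chooseLR ml mr (prevNonempty arr l ml) (nextNonempty arr r mr) := by
  intro n
  induction n with
  | zero => intro ml mr h; omega
  | succ k ih =>
    intro ml mr hfuel
    rw [expandGo]
    by_cases h1 : ml < l ∧ mr > r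
    · rw [if_pos h1, prevNonempty_step, if_neg (by omega), nextNonempty_step, if_neg (by omega)]
      rfl
    · rw [if_neg h1]
      by_cases h2 : l ≤ ml ∧ (PySem.List.pyGetD arr ml "") ≠ ""
      · rw [if_pos h2, prevNonempty_step, if_pos h2.1, if_pos h2.2]
        rcases hb : nextNonempty arr r mr with _ | b
        · rfl
        · have := nextNonempty_bounds arr r mr b hb
          simp only [chooseLR, if_pos (by omega : ml - ml ≤ b - mr)]
      · rw [if_neg h2]
        by_cases h3 : mr ≤ r ∧ (PySem.List.pyGetD arr mr "") ≠ ""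
        · rw [if_pos h3, nextNonempty_step, if_pos h3.1, if_pos h3.2]
          rcases ha : prevNonempty arr l ml with _ | a
          · rfl
          · have hbd := prevNonempty_bounds arr l ml a ha
            by_cases hml : l ≤ ml
            · have hempty : ¬ (PySem.List.pyGetD arr ml "") ≠ "" := by
                rcases not_and_or.mp h2 with h' | h'
                · omega
                · exact h'
              rw [prevNonempty_step, if_pos hml, if_neg hempty] at ha
              have := prevNonempty_bounds arr l (ml - 1) a ha
              simp only [chooseLR]
              rw [if_neg (by omega : ¬ (ml - a ≤ mr - mr))]
            · omega
        · rw [if_neg h3]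
          have hml : prevNonempty arr l ml = prevNonempty arr l (ml - 1) := by
            by_cases hli : l ≤ ml
            · have hempty : ¬ (PySem.List.pyGetD arr ml "") ≠ "" := by
                rcases not_and_or.mp h2 with h' | h'
                · omega
                · exact h'
              rw [prevNonempty_step, if_pos hli, if_neg hempty]
            · rw [prevNonempty_step, if_neg hli, prevNonempty_step, if_neg (by omega)]
          have hmr : nextNonempty arr r mr = nextNonempty arr r (mr + 1) := by
            by_cases hri : mr ≤ r
            · have hempty : ¬ (PySem.List.pyGetD arr mr "") ≠ "" := by
                rcases not_and_or.mp h3 with h' | h'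
                · omega
                · exact h'
              rw [nextNonempty_step, if_pos hri, if_neg hempty]
            · rw [nextNonempty_step, if_neg hri, nextNonempty_step, if_neg (by omega)]
          rw [ih (ml - 1) (mr + 1) (by rw [not_and_or] at h1; omega), hml, hmr]
          rcases ha : prevNonempty arr l (ml - 1) with _ | a <;>
            rcases hb : nextNonempty arr r (mr + 1) with _ | b <;> try rfl
          simp only [chooseLR]
          rw [if_congr (by omega : ml - 1 - a ≤ b - (mr + 1) ↔ ml - a ≤ b - mr) rfl rfl]

theorem expandA_eq_choose (arr : List String) (l r ml mr : Int) :
    expandA arr l r ml mr = chooseLR ml mr (prevNonempty arr l ml) (nextNonempty arr r mr) :=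
  expandGo_eq_choose arr l r _ ml mr (by omega)

-- The two outer recursions agree for every fuel.
theorem loops_eq (arr : List String) (word : String) :
    ∀ (fuel : Nat) (l r : Int), searchLoopA arr word fuel l r = searchRecB arr word fuel l r := by
  intro fuel
  induction fuel with
  | zero => intro l r; rfl
  | succ n ih =>
    intro l r
    rw [searchLoopA, searchRecB]
    dsimp only
    by_cases hlr : l ≤ r
    · rw [if_pos hlr, if_neg (show ¬ l > r by omega)]
      generalize l + PySem.Int.floordiv (r - l) 2 = m
      have tail : ∀ o : Option Int,
          (match o with
            | none => (-1 : Int)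
            | some m2 =>
              if PySem.List.pyGetD arr m2 "" = word then m2
              else if word < PySem.List.pyGetD arr m2 "" then searchLoopA arr word n l (m2 - 1)
              else searchLoopA arr word n (m2 + 1) r) =
          (match o with
            | none => (-1 : Int)
            | some m2 =>
              if PySem.List.pyGetD arr m2 "" = word then m2
              else if word < PySem.List.pyGetD arr m2 "" then searchRecB arr word n l (m2 - 1)
              else searchRecB arr word n (m2 + 1) r) := by
        intro o
        rcases o with _ | m2
        · rfl
        · simp only [ih]
      by_cases hg : PySem.List.pyGetD arr m "" = ""
      · rw [if_pos hg, if_pos hg, expandA_eq_choose]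
        have key : chooseLR (m - 1) (m + 1) (prevNonempty arr l (m - 1))
              (nextNonempty arr r (m + 1)) =
            (match prevNonempty arr l (m - 1), nextNonempty arr r (m + 1) with
              | none, none => (none : Option Int)
              | some a, none => some a
              | none, some b => some b
              | some a, some b => if m - a ≤ b - m then some a else some b) := by
          rcases prevNonempty arr l (m - 1) with _ | a <;>
            rcases nextNonempty arr r (m + 1) with _ | b <;> try rfl
          simp only [chooseLR]
          rw [if_congr (by omega : m - 1 - a ≤ b - (m + 1) ↔ m - a ≤ b - m) rfl rfl]
        rw [key]
        exact tail _
      · rw [if_neg hg, if_neg hg]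
        exact tail (some m)
    · rw [if_neg hlr, if_pos (show l > r by omega)]

-- ===== VERDICT (by name: the statement is the Claim_ definition above) =====
theorem search_spec : Claim_equal_search := by
  intro arr word _
  unfold Spec_search search search_alt
  exact loops_eq arr word (arr.length + 1) 0 ((arr.length : Int) - 1)
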